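-- pv_equiv track=rewrite | github.com/dxiaoqi/excel-switch-md-skills | xcel_switch_markdown.py | _unescape_md_cell_text
-- ===== SOURCE A (Python) =====
-- def _unescape_md_cell_text(s):
--     s = "" if s is None else str(s)
--     s = s.replace("\r\n", "\n").replace("\r", "\n")
--     s = s.replace("<br>", "\n")
--     out = []
--     i = 0
--     while i < len(s):
--         ch = s[i]
--         if ch == "\\" and i + 1 < len(s) and s[i + 1] in ("\\", "|"):
--             out.append(s[i + 1])
--             i += 2
--             continue
--         out.append(ch)
--         i += 1
--     return "".join(out)
-- ===== SOURCE B (Python) =====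
-- def _unescape_md_cell_text(s):
--     s = "" if s is None else str(s)
--     s = s.replace("\r\n", "\n").replace("\r", "\n")
--     s = s.replace("<br>", "\n")
--     parts = s.split("\\")
--     out = [parts[0]]
--     i = 1
--     while i < len(parts):
--         p = parts[i]
--         if p == "":
--             # adjacent backslashes "\\" collapse to one (a lone trailing backslash also lands here)
--             out.append("\\")
--             if i + 1 < len(parts):
--                 out.append(parts[i + 1])
--             i += 2
--         elif p.startswith("|"):
--             # "\|" unescapes to "|"
--             out.append(p)
--             i += 1
--         else:
--             # backslash before any other character is kept literally
--             out.append("\\" + p)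
--             i += 1
--     return "".join(out)
-- ===== Notes on version B (the rewrite author's own statement) =====
-- stated objective: faster
-- what changed: Replaces A's index-based while loop with one-character lookahead by splitting the string on backslash once and reassembling the parts (empty part = escaped backslash, part starting with '|' = escaped pipe, otherwise the backslash is kept literally); the per-character interpreter loop disappears in favour of C-level str.split/str.join over far fewer parts.
import Mathlib
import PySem

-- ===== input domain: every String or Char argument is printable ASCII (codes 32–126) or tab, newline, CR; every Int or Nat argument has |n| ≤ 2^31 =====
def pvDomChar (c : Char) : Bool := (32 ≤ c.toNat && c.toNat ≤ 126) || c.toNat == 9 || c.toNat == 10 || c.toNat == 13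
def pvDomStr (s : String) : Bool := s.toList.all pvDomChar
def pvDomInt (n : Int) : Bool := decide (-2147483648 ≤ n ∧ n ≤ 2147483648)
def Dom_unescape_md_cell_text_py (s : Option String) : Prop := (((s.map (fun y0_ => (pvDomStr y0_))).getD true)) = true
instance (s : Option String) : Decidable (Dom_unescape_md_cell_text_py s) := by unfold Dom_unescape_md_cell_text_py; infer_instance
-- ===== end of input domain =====

-- B replaces A's index-based per-character scanner (with lookahead) by splitting on '\' once and
-- reassembling the parts; same O(n), measurably faster in Python (bulk split/join instead of a per-char loop).

-- ===== PORT A =====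
-- the while loop of A: scan with one-character lookahead, consuming "\\\\" and "\\|" pairs
def pvLoopA : List Char → List Char
  | [] => []
  | '\\' :: d :: rest =>
      if d = '\\' ∨ d = '|' then d :: pvLoopA rest
      else '\\' :: pvLoopA (d :: rest)
  | c :: rest => c :: pvLoopA rest

def unescape_md_cell_text_py (s : Option String) : String :=
  let t := s.getD ""
  let t := PySem.Str.replace (PySem.Str.replace t "\r\n" "\n") "\r" "\n"
  let t := PySem.Str.replace t "<br>" "\n"
  String.mk (pvLoopA t.toList)

-- ===== PORT B =====
-- the while loop of B over parts[1:] (each part was preceded by a backslash in the input)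
def pvLoopB : List (List Char) → List (List Char)
  | [] => []
  | [] :: [] => [['\\']]                       -- p == "": lone trailing backslash
  | [] :: q :: rest => ['\\'] :: q :: pvLoopB rest  -- p == "": "\\\\", next part taken literally
  | p :: rest =>
      if PySem.Chars.startswith p ['|'] then p :: pvLoopB rest   -- "\\|" unescapes
      else ('\\' :: p) :: pvLoopB rest                           -- backslash kept literally

def unescape_md_cell_text_py_alt (s : Option String) : String :=
  let t := s.getD ""
  let t := PySem.Str.replace (PySem.Str.replace t "\r\n" "\n") "\r" "\n"
  let t := PySem.Str.replace t "<br>" "\n"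
  match PySem.Chars.splitOn t.toList ['\\'] with
  | [] => ""   -- unreachable: split never returns an empty list
  | p0 :: rest => String.mk (PySem.Chars.join [] (p0 :: pvLoopB rest))

-- ===== PRECONDITION & SPEC =====
def Spec_unescape_md_cell_text_py (s : Option String) (out : String) : Prop := out = unescape_md_cell_text_py_alt s
instance (s : Option String) (out : String) : Decidable (Spec_unescape_md_cell_text_py s out) := by unfold Spec_unescape_md_cell_text_py; infer_instance

-- ===== CLAIM (what is proved, stated in full; the proofs are below) =====
def Claim_equal_unescape_md_cell_text_py : Prop := ∀ (s : Option String), Dom_unescape_md_cell_text_py s → Spec_unescape_md_cell_text_py s (unescape_md_cell_text_py s)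

-- ===== LEMMAS AND PROOFS =====

-- structural (fuel-free) characterisation of splitting on a single backslash
def pvSplit1 : List Char → List (List Char)
  | [] => [[]]
  | c :: rest =>
      if c = '\\' then [] :: pvSplit1 rest
      else match pvSplit1 rest with
           | [] => [[c]]
           | p :: ps => (c :: p) :: ps

def pvPrepend (pre : List Char) : List (List Char) → List (List Char)
  | [] => [pre]
  | p :: ps => (pre ++ p) :: ps

theorem pvSplit1_ne_nil (cs : List Char) : pvSplit1 cs ≠ [] := by
  cases cs with
  | nil => simp [pvSplit1]
  | cons c rest =>
    simp only [pvSplit1]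
    split_ifs
    · simp
    · cases h : pvSplit1 rest <;> simp

-- convenient unfolding equations (all definitional)
theorem pvLoopB_nil_cons (q : List Char) (rest : List (List Char)) :
    pvLoopB ([] :: q :: rest) = ['\\'] :: q :: pvLoopB rest := rfl

theorem pvLoopB_cons (c : Char) (q : List Char) (rest : List (List Char)) :
    pvLoopB ((c :: q) :: rest) =
      if PySem.Chars.startswith (c :: q) ['|'] then (c :: q) :: pvLoopB rest
      else ('\\' :: c :: q) :: pvLoopB rest := rfl

theorem pvSplit1_cons_ne (c : Char) (rest : List Char) (hc : c ≠ '\\')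
    (q : List Char) (qs : List (List Char)) (hs : pvSplit1 rest = q :: qs) :
    pvSplit1 (c :: rest) = (c :: q) :: qs := by
  simp [pvSplit1, hc, hs]

theorem pvJoin_nil_eq_flatten (ps : List (List Char)) : PySem.Chars.join [] ps = ps.flatten := by
  induction ps with
  | nil => simp [PySem.Chars.join_nil]
  | cons p ps ih =>
    cases ps with
    | nil => simp [PySem.Chars.join_singleton]
    | cons q rest => rw [PySem.Chars.join_cons_cons, ih]; simp

theorem pvSplitOn_go_eq (l : List Char) : ∀ (fuel : Nat) (cur : List Char) (acc : List (List Char)),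
    l.length < fuel →
    PySem.Chars.splitOn.go ['\\'] fuel l cur acc = acc.reverse ++ pvPrepend cur.reverse (pvSplit1 l) := by
  induction l with
  | nil =>
    intro fuel cur acc h
    match fuel, h with
    | fuel + 1, _ =>
      rw [PySem.Chars.splitOn.go.eq_def]
      simp [pvSplit1, pvPrepend]
  | cons c rest ih =>
    intro fuel cur acc h
    match fuel, h with
    | fuel + 1, h =>
      rw [PySem.Chars.splitOn.go.eq_def]
      by_cases hc : c = '\\'
      · subst hc
        have hpre : List.isPrefixOf ['\\'] ('\\' :: rest) = true := by
          simp [List.isPrefixOf]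
        simp only [hpre, if_true]
        rw [show List.drop ['\\'].length ('\\' :: rest) = rest from rfl]
        rw [ih fuel [] (cur.reverse :: acc) (by simpa using Nat.lt_of_succ_lt_succ h)]
        have hne := pvSplit1_ne_nil rest
        cases hs : pvSplit1 rest with
        | nil => exact absurd hs hne
        | cons p ps => simp [pvSplit1, pvPrepend, hs]
      · have hpre : List.isPrefixOf ['\\'] (c :: rest) = false := by
          simp only [List.isPrefixOf, Bool.and_true]
          exact beq_eq_false_iff_ne.mpr (fun hcc => hc hcc.symm)
        simp only [hpre, Bool.false_eq_true, if_false]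
        rw [ih fuel (c :: cur) acc (by simpa using Nat.lt_of_succ_lt_succ h)]
        have hne := pvSplit1_ne_nil rest
        cases hs : pvSplit1 rest with
        | nil => exact absurd hs hne
        | cons p ps => simp [pvSplit1, pvPrepend, hc, hs]

theorem pvSplitOn_eq (cs : List Char) : PySem.Chars.splitOn cs ['\\'] = pvSplit1 cs := by
  show PySem.Chars.splitOn.go ['\\'] (cs.length + 1) cs [] [] = pvSplit1 cs
  rw [pvSplitOn_go_eq cs (cs.length + 1) [] [] (Nat.lt_succ_self _)]
  have hne := pvSplit1_ne_nil cs
  cases hs : pvSplit1 cs with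
  | nil => exact absurd hs hne
  | cons p ps => simp [pvPrepend]

-- unfolding pvLoopA past a non-backslash head
theorem pvLoopA_cons_ne (c : Char) (rest : List Char) (hc : c ≠ '\\') :
    pvLoopA (c :: rest) = c :: pvLoopA rest := by
  cases rest with
  | nil => rw [pvLoopA.eq_def]; simp
  | cons d r => rw [pvLoopA.eq_def]; simp [hc]

-- the reassembly of B computes exactly what A's scanner computes
theorem pvMain (cs : List Char) :
    (match pvSplit1 cs with
     | [] => []
     | p0 :: rest => p0 ++ (pvLoopB rest).flatten) = pvLoopA cs := by
  induction cs using pvLoopA.induct with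
  | case1 => simp [pvSplit1, pvLoopA, pvLoopB]
  | case2 d rest hd ih =>
    -- cs = '\\' :: d :: rest, d ∈ {'\\','|'}
    have hne := pvSplit1_ne_nil rest
    cases hs : pvSplit1 rest with
    | nil => exact absurd hs hne
    | cons q qs =>
      rw [hs] at ih
      have ih' : q ++ (pvLoopB qs).flatten = pvLoopA rest := ih
      rcases hd with hd | hd
      · subst hd
        have h1 : pvSplit1 ('\\' :: '\\' :: rest) = [] :: [] :: q :: qs := by
          simp [pvSplit1, hs]
        rw [h1]
        simp only [pvLoopB_nil_cons, List.flatten_cons, List.nil_append, pvLoopA]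
        simp [ih']
      · subst hd
        have h1 : pvSplit1 ('\\' :: '|' :: rest) = [] :: ('|' :: q) :: qs := by
          simp [pvSplit1, hs]
        rw [h1]
        have h2 : PySem.Chars.startswith ('|' :: q) ['|'] = true := by
          simp [PySem.Chars.startswith, List.isPrefixOf]
        simp only [pvLoopB_cons, h2, if_true, List.flatten_cons, pvLoopA]
        simp [ih']
  | case3 d rest hd ih =>
    -- cs = '\\' :: d :: rest, d ∉ {'\\','|'}
    have hd1 : d ≠ '\\' := fun h => hd (Or.inl h)
    have hd2 : d ≠ '|' := fun h => hd (Or.inr h)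
    have hne := pvSplit1_ne_nil rest
    cases hs : pvSplit1 rest with
    | nil => exact absurd hs hne
    | cons q qs =>
      rw [pvSplit1_cons_ne d rest hd1 q qs hs] at ih
      have ih' : (d :: q) ++ (pvLoopB qs).flatten = pvLoopA (d :: rest) := ih
      have h1 : pvSplit1 ('\\' :: d :: rest) = [] :: (d :: q) :: qs := by
        simp [pvSplit1, hd1, hs]
      rw [h1]
      have h2 : PySem.Chars.startswith (d :: q) ['|'] = false := by
        simp only [PySem.Chars.startswith, List.isPrefixOf, Bool.and_true]
        exact beq_eq_false_iff_ne.mpr (fun hcc => hd2 hcc.symm)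
      simp only [pvLoopB_cons, h2, Bool.false_eq_true, if_false, List.flatten_cons,
        List.nil_append, pvLoopA, if_neg hd]
      simpa using ih'
  | case4 c rest hguard ih =>
    by_cases hcc : c = '\\'
    · subst hcc
      cases rest with
      | nil => decide
      | cons d rest' => exact absurd rfl (fun h => hguard d rest' rfl h)
    · have hne := pvSplit1_ne_nil rest
      cases hs : pvSplit1 rest with
      | nil => exact absurd hs hne
      | cons q qs =>
        rw [hs] at ih
        have ih' : q ++ (pvLoopB qs).flatten = pvLoopA rest := ih
        rw [pvSplit1_cons_ne c rest hcc q qs hs, pvLoopA_cons_ne c rest hcc]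
        simpa using ih'

-- ===== VERDICT (by name: the statement is the Claim_ definition above) =====
theorem unescape_md_cell_text_py_spec : Claim_equal_unescape_md_cell_text_py := by
  intro s _
  unfold Spec_unescape_md_cell_text_py unescape_md_cell_text_py unescape_md_cell_text_py_alt
  simp only [pvSplitOn_eq]
  generalize (PySem.Str.replace (PySem.Str.replace (PySem.Str.replace (s.getD "") "\r\n" "\n") "\r" "\n") "<br>" "\n").toList = cs
  have h := pvMain cs
  have hne := pvSplit1_ne_nil cs
  cases hs : pvSplit1 cs with
  | nil => exact absurd hs hne
  | cons p0 rest =>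
    rw [hs] at h
    have h' : p0 ++ (pvLoopB rest).flatten = pvLoopA cs := h
    show String.mk (pvLoopA cs) = String.mk (PySem.Chars.join [] (p0 :: pvLoopB rest))
    rw [pvJoin_nil_eq_flatten, List.flatten_cons, h']
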